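-- pv_equiv track=rewrite | github.com/TurtleEgg/act_tesser | hypertools.py | _trim_by_nones
-- ===== SOURCE A (Python) =====
-- def _trim_by_nones(elements: list) -> list:
--     """Удаление None-элементов в конце списка."""
--     trimming_element = next(
--         (
--             len(elements) - i
--             for i, element in enumerate(elements[::-1])
--             if element or element == 0
--         ),
--         len(elements),
--     )
--     return elements[:trimming_element]
-- ===== SOURCE B (Python) =====
-- def _trim_by_nones(elements: list) -> list:
--     """Удаление None-элементов в конце списка."""
--     result = list(elements)
--     while result and not (result[-1] or result[-1] == 0):
--         result.pop()
--     return result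
-- ===== Notes on version B (the rewrite author's own statement) =====
-- stated objective: simpler
-- what changed: B replaces A's reversed copy plus next()-over-a-generator index search and slicing by a while loop that pops unkept trailing elements off a copy of the list, with no index arithmetic at all.
-- intended difference: On nonempty lists whose elements are all None, A's next() default len(elements) makes it return the whole list unchanged, while B returns an empty list, which is the intended result of trimming trailing Nones. — e.g. on _trim_by_nones([none, none]): A returns [none, none], B returns []
import Mathlib
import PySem

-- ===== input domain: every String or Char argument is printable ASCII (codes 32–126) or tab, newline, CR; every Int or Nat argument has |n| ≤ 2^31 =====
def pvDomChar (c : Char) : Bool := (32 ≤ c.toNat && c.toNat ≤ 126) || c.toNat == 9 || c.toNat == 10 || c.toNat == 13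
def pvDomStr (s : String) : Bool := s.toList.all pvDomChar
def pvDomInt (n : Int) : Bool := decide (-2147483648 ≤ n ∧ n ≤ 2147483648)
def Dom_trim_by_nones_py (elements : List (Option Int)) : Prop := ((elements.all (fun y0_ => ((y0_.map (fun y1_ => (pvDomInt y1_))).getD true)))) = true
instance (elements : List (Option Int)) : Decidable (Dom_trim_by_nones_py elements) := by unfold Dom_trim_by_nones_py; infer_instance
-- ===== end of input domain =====

-- B replaces A's reversed copy + next()-generator index search + slice by a while loop that
-- pops unkept trailing elements off a copy; on all-None nonempty lists A returns the list
-- unchanged and B returns an empty list (the intended trim), stated as D_ below.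

-- ===== PORT A =====
-- elements[::-1]; slice? with step -1 never returns none, so getD [] is unreachable
def trim_by_nones_py (elements : List (Option Int)) : List (Option Int) :=
  let rev := (PySem.List.slice? elements none none (-1)).getD []
  let trimming_element : Int :=
    match (PySem.List.enumerate rev 0).find?
        (fun p => (match p.2 with | none => false | some n => decide (n ≠ 0)) || (p.2 == some 0)) with
    | some p => (elements.length : Int) - p.1
    | none => (elements.length : Int)
  PySem.List.slice elements none (some trimming_element)

-- ===== PORT B =====
-- the truthiness test 'result[-1] or result[-1] == 0' of Source B
def pvKeepB (e : Option Int) : Bool :=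
  (match e with | none => false | some n => decide (n ≠ 0)) || (e == some 0)

-- the while loop of Source B: 'while result and not keep(result[-1]): result.pop()';
-- result.pop() removes exactly the last element, i.e. dropLast (the popped value is unused)
def pvTrimLoop (result : List (Option Int)) : List (Option Int) :=
  if result = [] then result
  else if pvKeepB ((PySem.List.pyGet? result (-1)).getD none) then result
  else pvTrimLoop result.dropLast
termination_by result.length
decreasing_by
  rename_i hne _
  have := List.length_pos_iff.mpr hne
  simp only [List.length_dropLast]
  omega

def trim_by_nones_py_alt (elements : List (Option Int)) : List (Option Int) :=
  pvTrimLoop elements  -- result = list(elements) is a fresh copy of the same list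

-- ===== PRECONDITION & SPEC =====
-- On nonempty all-None lists A's next() default len(elements) returns the whole list unchanged;
-- B returns an empty list, the intended result of trimming trailing Nones.
def D_trim_by_nones_py (elements : List (Option Int)) : Prop :=
  elements ≠ [] ∧ ∀ e ∈ elements, e = none
instance (elements : List (Option Int)) : Decidable (D_trim_by_nones_py elements) := by
  unfold D_trim_by_nones_py; infer_instance

def Spec_trim_by_nones_py (elements : List (Option Int)) (out : List (Option Int)) : Prop :=
  ¬ D_trim_by_nones_py elements → out = trim_by_nones_py_alt elements
instance (elements : List (Option Int)) (out : List (Option Int)) : Decidable (Spec_trim_by_nones_py elements out) := by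
  unfold Spec_trim_by_nones_py; infer_instance

def pvDiffWitness_trim_by_nones_py : List (Option Int) := [none, none]
def pvDiffWitnessOut_trim_by_nones_py : (List (Option Int)) × (List (Option Int)) :=
  ([none, none], [])

-- ===== CLAIM (what is proved, stated in full; the proofs are below) =====
def Claim_unchanged_trim_by_nones_py : Prop :=
  ∀ (elements : List (Option Int)), Dom_trim_by_nones_py elements →
    Spec_trim_by_nones_py elements (trim_by_nones_py elements)
def Claim_changed_trim_by_nones_py : Prop :=
  Dom_trim_by_nones_py (pvDiffWitness_trim_by_nones_py) ∧
  D_trim_by_nones_py (pvDiffWitness_trim_by_nones_py) ∧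
  trim_by_nones_py (pvDiffWitness_trim_by_nones_py) = pvDiffWitnessOut_trim_by_nones_py.1 ∧
  trim_by_nones_py_alt (pvDiffWitness_trim_by_nones_py) = pvDiffWitnessOut_trim_by_nones_py.2 ∧
  pvDiffWitnessOut_trim_by_nones_py.1 ≠ pvDiffWitnessOut_trim_by_nones_py.2
def Claim_exact_trim_by_nones_py : Prop :=
  ∀ (elements : List (Option Int)), Dom_trim_by_nones_py elements →
    D_trim_by_nones_py elements → trim_by_nones_py elements ≠ trim_by_nones_py_alt elements

-- ===== LEMMAS AND PROOFS =====

-- The keep predicate "element or element == 0" on Option Int is exactly isSome.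
lemma pv_pred_eq :
    (fun (p : Int × Option Int) =>
      (match p.2 with | none => false | some n => decide (n ≠ 0)) || (p.2 == some 0))
    = (fun p => p.2.isSome) := by
  funext p
  rcases p with ⟨i, e⟩
  cases e with
  | none => rfl
  | some n => by_cases h : n = 0 <;> simp [h]

lemma pv_keepB_eq (e : Option Int) : pvKeepB e = e.isSome := by
  cases e with
  | none => rfl
  | some n => by_cases h : n = 0 <;> simp [pvKeepB, h]

lemma pv_find?_enumerate :
    ∀ (xs : List (Option Int)) (s : Int),
      ((PySem.List.enumerate xs s).find? (fun p => p.2.isSome)).map Prod.fst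
      = if (∀ e ∈ xs, e = none) then none
        else some (s + ((xs.takeWhile Option.isNone).length : Int)) := by
  intro xs
  induction xs with
  | nil => intro s; simp [PySem.List.enumerate_nil]
  | cons x rest ih =>
    intro s
    rw [PySem.List.enumerate_cons]
    cases x with
    | none =>
      rw [List.find?_cons_of_neg (by simp)]
      rw [ih (s + 1)]
      have hiff : (∀ e ∈ (none :: rest : List (Option Int)), e = none) ↔ (∀ e ∈ rest, e = none) := by
        simp
      by_cases h : ∀ e ∈ rest, e = none
      · rw [if_pos h, if_pos (hiff.mpr h)]
      · rw [if_neg h, if_neg (fun hc => h (hiff.mp hc))]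
        simp only [List.takeWhile, Option.isNone_none, List.length_cons]
        congr 1
        push_cast
        ring
    | some n =>
      rw [List.find?_cons_of_pos (by simp)]
      rw [if_neg (by intro h; have := h (some n) (by simp); simp at this)]
      simp [List.takeWhile]

lemma pv_A_some (L : List (Option Int)) (h : ¬ ∀ e ∈ L, e = none) :
    trim_by_nones_py L
    = L.take (L.length - (L.reverse.takeWhile Option.isNone).length) := by
  unfold trim_by_nones_py
  rw [PySem.List.slice?_none_none_neg_one]
  simp only [Option.getD_some]
  rw [pv_pred_eq]
  have hfind := pv_find?_enumerate L.reverse 0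
  rw [if_neg (by intro hc; exact h (fun e he => hc e (List.mem_reverse.mpr he)))] at hfind
  set k := (L.reverse.takeWhile Option.isNone).length with hkdef
  have hk : k ≤ L.length := by
    have := (List.takeWhile_sublist (p := Option.isNone) (l := L.reverse)).length_le
    rw [List.length_reverse] at this; omega
  rcases hf : (PySem.List.enumerate L.reverse 0).find? (fun p => p.2.isSome) with _ | p
  · rw [hf] at hfind; simp at hfind
  · rw [hf] at hfind
    simp only [Option.map_some] at hfind
    have hp1 : p.1 = (k : Int) := by
      have := hfind.symm
      injection this with h'
      omega
    rw [hf]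
    simp only [hp1]
    have h1 : (L.length : Int) - (k : Int) = ((L.length - k : Nat) : Int) := by omega
    rw [h1, PySem.List.slice_to_natCast]

lemma pv_A_none (L : List (Option Int)) (h : ∀ e ∈ L, e = none) :
    trim_by_nones_py L = L := by
  unfold trim_by_nones_py
  rw [PySem.List.slice?_none_none_neg_one]
  simp only [Option.getD_some]
  rw [pv_pred_eq]
  have hfind := pv_find?_enumerate L.reverse 0
  rw [if_pos (by intro e he; exact h e (List.mem_reverse.mp he))] at hfind
  rcases hf : (PySem.List.enumerate L.reverse 0).find? (fun p => p.2.isSome) with _ | p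
  · simp only [hf]
    rw [PySem.List.slice_to_natCast]
    simp
  · rw [hf] at hfind; simp at hfind

-- B's loop computed in closed form: induction over the list from the right.
lemma pv_B (L : List (Option Int)) :
    trim_by_nones_py_alt L
    = if (∀ e ∈ L, e = none) then []
      else L.take (L.length - (L.reverse.takeWhile Option.isNone).length) := by
  unfold trim_by_nones_py_alt
  induction L using List.reverseRecOn with
  | nil => simp [pvTrimLoop]
  | append_singleton ys e ih =>
    rw [pvTrimLoop]
    rw [if_neg (by simp)]
    cases e with
    | some n =>
      rw [if_pos (by rw [PySem.List.pyGet?_neg_one_append_singleton]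
                     simp [pv_keepB_eq])]
      rw [if_neg (by intro h; have := h (some n) (by simp); simp at this)]
      have hk : ((ys ++ [some n]).reverse.takeWhile Option.isNone).length = 0 := by
        simp [List.takeWhile]
      rw [hk]
      simp
    | none =>
      rw [if_neg (by rw [PySem.List.pyGet?_neg_one_append_singleton]
                     simp [pv_keepB_eq])]
      rw [List.dropLast_concat, ih]
      have hiff : (∀ e ∈ ys ++ [(none : Option Int)], e = none) ↔ (∀ e ∈ ys, e = none) := by
        constructor
        · intro h e he; exact h e (List.mem_append_left _ he)
        · intro h e he
          rcases List.mem_append.mp he with h1 | h1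
          · exact h e h1
          · simpa using h1
      by_cases h : ∀ e ∈ ys, e = none
      · rw [if_pos h, if_pos (hiff.mpr h)]
      · rw [if_neg h, if_neg (fun hc => h (hiff.mp hc))]
        have hk : ((ys ++ [(none : Option Int)]).reverse.takeWhile Option.isNone).length
            = (ys.reverse.takeWhile Option.isNone).length + 1 := by
          simp [List.takeWhile]
        have hle : (ys.reverse.takeWhile Option.isNone).length ≤ ys.length := by
          have := (List.takeWhile_sublist (p := Option.isNone) (l := ys.reverse)).length_le
          rw [List.length_reverse] at this; omega
        rw [hk]
        rw [List.length_append, List.length_cons, List.length_nil]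
        have harith : ys.length + 1 - ((ys.reverse.takeWhile Option.isNone).length + 1)
            = ys.length - (ys.reverse.takeWhile Option.isNone).length := by omega
        rw [harith, List.take_append_of_le_length (by omega)]

-- ===== VERDICT (by name: the statement is the Claim_ definition above) =====
theorem trim_by_nones_py_spec : Claim_unchanged_trim_by_nones_py := by
  intro L _ hD
  by_cases h : ∀ e ∈ L, e = none
  · have hnil : L = [] := by
      by_contra hne
      exact hD ⟨hne, h⟩
    subst hnil
    rw [pv_A_none [] (by simp), pv_B]
    simp
  · rw [pv_A_some L h, pv_B L, if_neg h]

theorem trim_by_nones_py_changed : Claim_changed_trim_by_nones_py := by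
  unfold Claim_changed_trim_by_nones_py
  refine ⟨by decide, by decide, by decide, ?_, by decide⟩
  rw [pv_B]
  decide

theorem trim_by_nones_py_tight : Claim_exact_trim_by_nones_py := by
  intro L _ hD
  rcases hD with ⟨hne, hall⟩
  rw [pv_A_none L hall, pv_B L, if_pos hall]
  exact hne
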